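-- pv_equiv track=rewrite | github.com/goldsergeant/Algorithm-problem-solving | 프로그래머스/3/77886. 110 옮기기/110 옮기기.py | solution
-- ===== SOURCE A (Python) =====
-- def solution(s):
--     answer = []
--     for string in s:
--         check = [True for _ in range(len(string))]
--         tmp = []
--         cnt = 0
--         stack = []
--         for i in range(len(string)):
--             while len(stack) >= 3 and string[stack[-3]] + string[stack[-2]] + string[stack[-1]] == '110':
--                 three, two, one = stack.pop(), stack.pop(), stack.pop()
--                 cnt += 1
--                 check[one] = check[two] = check[three] = False
--             stack.append(i)
--         while len(stack) >= 3 and string[stack[-3]] + string[stack[-2]] + string[stack[-1]] == '110':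
--             three, two, one = stack.pop(), stack.pop(), stack.pop()
--             cnt += 1
--             check[one] = check[two] = check[three] = False
--
--         for i in range(len(string)):
--             if check[i]:
--                 tmp.append(string[i])
--
--         tmp=''.join(tmp)
--         if '11' in tmp:
--             target=tmp.index('11')
--             answer.append(tmp[:target]+'110'*cnt+tmp[target:])
--         elif '0' in tmp:
--             last_zero_idx=0
--             for i in range(len(tmp)-1,-1,-1):
--                 if tmp[i] == '0':
--                     last_zero_idx=i
--                     break
--
--             answer.append(tmp[:last_zero_idx+1]+'110'*cnt+tmp[last_zero_idx+1:])
--         else: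
--             answer.append('110'*cnt+tmp)
--     return answer
-- ===== SOURCE B (Python) =====
-- def solution(s):
--     answer = []
--     for string in s:
--         t = string
--         while '110' in t:
--             t = t.replace('110', '')
--         cnt = (len(string) - len(t)) // 3
--         p = t.find('11')
--         if p < 0:
--             p = 0
--             for k, c in enumerate(t):
--                 if c == '0':
--                     p = k + 1
--         answer.append(t[:p] + '110' * cnt + t[p:])
--     return answer
-- ===== Notes on version B (the rewrite author's own statement) =====
-- stated objective: alternative
-- what changed: The removal phase keeps no stack, check array or reconstruction pass at all: it repeatedly applies str.replace('110','') until no '110' remains (deletion of '110' is confluent, so the residual is the same), and recovers the removal count arithmetically as (len(original)-len(residual))//3; insertion collapses to one splice at find('11'), else after the last '0'.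
import Mathlib
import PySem

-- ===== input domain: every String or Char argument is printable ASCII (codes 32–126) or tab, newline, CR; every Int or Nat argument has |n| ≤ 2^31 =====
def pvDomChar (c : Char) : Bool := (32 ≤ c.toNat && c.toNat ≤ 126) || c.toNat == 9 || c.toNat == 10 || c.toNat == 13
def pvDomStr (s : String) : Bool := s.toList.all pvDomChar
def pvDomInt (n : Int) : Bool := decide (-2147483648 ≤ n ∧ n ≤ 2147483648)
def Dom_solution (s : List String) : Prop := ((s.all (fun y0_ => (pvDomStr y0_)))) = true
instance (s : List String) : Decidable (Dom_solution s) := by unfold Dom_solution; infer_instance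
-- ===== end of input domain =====

-- B keeps no stack, check array or reconstruction pass: it deletes '110' by repeated
-- str.replace('110','') to a fixpoint (deletion of '110' is confluent, so the residual is the
-- same), recovers the count as (len-len)//3, and splices once (objective: alternative).

-- ===== PORT A =====

-- shared literal helper: '110' * cnt (string repetition, as repeated concatenation)
def repChars (n : Nat) : List Char := (List.range n).foldl (fun acc _ => acc ++ ['1', '1', '0']) []

-- string[i]; every call site passes an in-range index, so the ' ' default is never used
def charAt (cs : List Char) (i : Nat) : Char := cs.getD i ' '

-- A's inner `while len(stack) >= 3 and string[stack[-3]]+string[stack[-2]]+string[stack[-1]] == '110'`.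
-- The Python stack is kept reversed (head = stack[-1]); t/w/o are stack[-1]/stack[-2]/stack[-3].
def aWhile (cs : List Char) (check : List Bool) (cnt : Nat) : List Nat → List Bool × Nat × List Nat
  | t :: w :: o :: rest =>
    if charAt cs o = '1' ∧ charAt cs w = '1' ∧ charAt cs t = '0' then
      aWhile cs (((check.set o false).set w false).set t false) (cnt + 1) rest
    else (check, cnt, t :: w :: o :: rest)
  | st => (check, cnt, st)

-- A's body for one string of the outer `for string in s`
def aPerString (str : String) : String :=
  let cs := str.toList
  let n := cs.length
  -- check = [True for _ in range(len(string))]; cnt = 0; stack = []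
  -- for i in range(len(string)): while …: pop/pop/pop, cnt += 1, check[…]=False; stack.append(i)
  let s1 := (List.range n).foldl
      (fun acc i =>
        let r := aWhile cs acc.1 acc.2.1 acc.2.2
        (r.1, r.2.1, i :: r.2.2))
      (List.replicate n true, 0, ([] : List Nat))
  -- trailing while
  let r := aWhile cs s1.1 s1.2.1 s1.2.2
  let check := r.1
  let cnt := r.2.1
  -- tmp = ''.join(string[i] for i in range(len) if check[i])
  let tmp := (List.range n).foldl (fun acc i => if check.getD i false then acc ++ [charAt cs i] else acc) []
  if PySem.Chars.isIn ['1', '1'] tmp then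
    -- target = tmp.index('11')  (present, so index = find)
    let target := PySem.Chars.find tmp ['1', '1']
    String.ofList (PySem.List.slice tmp none (some target) ++ repChars cnt ++ PySem.List.slice tmp (some target) none)
  else if PySem.Chars.isIn ['0'] tmp then
    -- last_zero_idx = 0; for i in range(len(tmp)-1, -1, -1): if tmp[i] == '0': last_zero_idx = i; break
    -- (break encoded by an Option accumulator; the initial 0 is the .getD default)
    let lz := ((PySem.List.pyRange ((tmp.length : Int) - 1) (-1) (-1)).foldl
        (fun (acc : Option Nat) i =>
          match acc with
          | some _ => acc
          | none => if PySem.List.pyGetD tmp i ' ' = '0' then some i.toNat else none)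
        none).getD 0
    -- tmp[:lz+1] + '110'*cnt + tmp[lz+1:]  (nonnegative bounds: slices are take/drop)
    String.ofList (tmp.take (lz + 1) ++ repChars cnt ++ tmp.drop (lz + 1))
  else
    String.ofList (repChars cnt ++ tmp)

def solution (s : List String) : List String := s.foldl (fun acc str => acc ++ [aPerString str]) []

-- ===== PORT B =====

-- termination helpers for B's `while '110' in t:` loop: one replace('110','') strictly shortens.
-- del is the contract of Chars.replace with old = "110", new = "" (left-to-right deletion scan).
def del : List Char → List Char
  | [] => []
  | c :: t => if ['1', '1', '0'].isPrefixOf (c :: t) then del (t.drop 2) else c :: del t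
termination_by l => l.length
decreasing_by
  all_goals simp [List.length_drop]

theorem replace_go_eq_del (fuel : Nat) : ∀ (l acc : List Char), l.length ≤ fuel →
    PySem.Chars.replace.go ['1', '1', '0'] [] fuel l acc = acc.reverse ++ del l := by
  induction fuel with
  | zero =>
    intro l acc hl
    match l with
    | [] => simp [PySem.Chars.replace.go, del]
    | c :: t => simp at hl
  | succ fuel ih =>
    intro l acc hl
    match l with
    | [] => simp [PySem.Chars.replace.go, del]
    | c :: t =>
      rw [PySem.Chars.replace.go, del]
      by_cases hp : ['1', '1', '0'].isPrefixOf (c :: t) = true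
      · rw [if_pos hp, if_pos hp]
        show PySem.Chars.replace.go _ _ fuel (t.drop 2) acc = acc.reverse ++ del (t.drop 2)
        exact ih (t.drop 2) acc (by simp at hl ⊢; omega)
      · rw [if_neg hp, if_neg hp, ih t (c :: acc) (by simp at hl ⊢; omega)]
        simp

theorem replace110_eq_del (l : List Char) :
    PySem.Chars.replace l ['1', '1', '0'] [] = del l := by
  rw [PySem.Chars.replace]
  simp only [List.isEmpty_cons, Bool.false_eq_true, if_false]
  exact replace_go_eq_del l.length l [] le_rfl

theorem del_length_lt (l : List Char) (h : ['1', '1', '0'] <:+: l) :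
    (del l).length < l.length := by
  induction l using del.induct with
  | case1 => simp at h
  | case2 c t hp ih =>
    rw [del, if_pos hp]
    have hle : ∀ m : List Char, (del m).length ≤ m.length := by
      intro m
      induction m using del.induct with
      | case1 => simp [del]
      | case2 c' t' hp' ih' => rw [del, if_pos hp']; simp at ih' ⊢; omega
      | case3 c' t' hp' ih' => rw [del, if_neg hp']; simpa using ih'
    have := hle (t.drop 2)
    simp at this ⊢
    omega
  | case3 c t hp ih =>
    rw [del, if_neg hp]
    have ht : ['1', '1', '0'] <:+: t := by
      rcases List.infix_cons_iff.1 h with h' | h'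
      · exact absurd (List.isPrefixOf_iff_prefix.2 h') hp
      · exact h'
    simpa using ih ht

theorem replace110_len_lt (t : List Char) (h : PySem.Chars.isIn ['1', '1', '0'] t = true) :
    (PySem.Chars.replace t ['1', '1', '0'] []).length < t.length := by
  rw [replace110_eq_del]
  exact del_length_lt t ((PySem.Chars.isIn_iff_infix _ _).1 h)

-- `while '110' in t: t = t.replace('110', '')`
def bLoop (t : List Char) : List Char :=
  if h : PySem.Chars.isIn ['1', '1', '0'] t = true then
    bLoop (PySem.Chars.replace t ['1', '1', '0'] [])
  else t
termination_by t.length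
decreasing_by exact replace110_len_lt t h

def bPerString (str : String) : String :=
  let t := bLoop str.toList                        -- the fixpoint of replace('110','')
  -- cnt = (len(string) - len(t)) // 3
  let cnt : Int := PySem.Int.floordiv ((str.toList.length : Int) - (t.length : Int)) 3
  let p0 := PySem.Chars.find t ['1', '1']          -- p = t.find('11')
  -- if p < 0: p = 0; for k, c in enumerate(t): if c == '0': p = k + 1
  let p := if p0 < 0 then t.zipIdx.foldl (fun q kc => if kc.1 = '0' then (kc.2 : Int) + 1 else q) 0 else p0
  -- '110' * cnt: repetition by a nonpositive int is '' (cnt.toNat)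
  String.ofList (PySem.List.slice t none (some p) ++ repChars cnt.toNat ++ PySem.List.slice t (some p) none)

def solution_alt (s : List String) : List String := s.map bPerString

-- ===== PRECONDITION & SPEC =====
def Spec_solution (s : List String) (out : List String) : Prop := out = solution_alt s
instance (s : List String) (out : List String) : Decidable (Spec_solution s out) := by unfold Spec_solution; infer_instance

-- ===== CLAIM (what is proved, stated in full; the proofs are below) =====
def Claim_equal_solution : Prop := ∀ (s : List String), Dom_solution s → Spec_solution s (solution s)

-- ===== LEMMAS AND PROOFS =====

-- proof-side device: the one-pass character stack; both A's index-stack scan and B's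
-- replace-fixpoint are characterised against it.
def bStep (acc : List Char × Nat) (c : Char) : List Char × Nat :=
  if (c :: acc.1).take 3 = ['0', '1', '1'] then ((c :: acc.1).drop 3, acc.2 + 1)
  else (c :: acc.1, acc.2)

def stackPerString (str : String) : String :=
  let r := str.toList.foldl bStep ([], 0)
  let tmp := r.1.reverse
  let p0 := PySem.Chars.find tmp ['1', '1']
  let p := if p0 < 0 then tmp.zipIdx.foldl (fun q kc => if kc.1 = '0' then (kc.2 : Int) + 1 else q) 0 else p0
  String.ofList (PySem.List.slice tmp none (some p) ++ repChars r.2 ++ PySem.List.slice tmp (some p) none)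

-- ---- part 1: A's per-string body equals the character-stack pass ----

-- B's stack never contains the pattern '0','1','1' (head-first, i.e. Python's '110')
def NoPat (l : List Char) : Prop := ∀ l1 l2, l ≠ l1 ++ '0' :: '1' :: '1' :: l2

-- the invariant relating A's resolved state to the stack state after i characters
def AInv (cs : List Char) (i : Nat) (A : List Bool × Nat × List Nat) (B : List Char × Nat) : Prop :=
  A.2.2.map (charAt cs) = B.1 ∧
  A.2.1 = B.2 ∧
  List.Pairwise (· > ·) A.2.2 ∧
  (∀ j ∈ A.2.2, j < i) ∧
  A.1.length = cs.length ∧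
  (∀ j, j < cs.length → (A.1.getD j false = true ↔ (j ∈ A.2.2 ∨ i ≤ j))) ∧
  NoPat B.1

theorem aWhile_no_match (cs : List Char) (check : List Bool) (cnt : Nat) (st : List Nat)
    (h : ∀ t w o rest, st = t :: w :: o :: rest →
      ¬(charAt cs o = '1' ∧ charAt cs w = '1' ∧ charAt cs t = '0')) :
    aWhile cs check cnt st = (check, cnt, st) := by
  match st with
  | [] => rfl
  | [t] => rfl
  | [t, w] => rfl
  | t :: w :: o :: rest =>
    rw [aWhile]
    simp [h t w o rest rfl]

theorem inv_step (cs : List Char) (i : Nat) (A : List Bool × Nat × List Nat) (B : List Char × Nat)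
    (hInv : AInv cs i A B) (hi : i < cs.length) :
    AInv cs (i + 1)
      (let r := aWhile cs A.1 A.2.1 (i :: A.2.2); (r.1, r.2.1, r.2.2))
      (bStep B (charAt cs i)) := by
  obtain ⟨check, cnt, st⟩ := A
  obtain ⟨stB, cntB⟩ := B
  obtain ⟨hmap, hcnt, hpw, hlt, hlen, hchk, hnp⟩ := hInv
  subst hmap hcnt
  by_cases hc : ∃ w o rest, st = w :: o :: rest ∧
      charAt cs o = '1' ∧ charAt cs w = '1' ∧ charAt cs i = '0'
  · -- the top three form '110': A pops once, B pops once
    obtain ⟨w, o, rest, hst, ho, hw, hi0⟩ := hc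
    subst hst
    have hwo : w > o := (List.pairwise_cons.1 hpw).1 o (by simp)
    have hwr : ∀ j ∈ rest, w > j := fun j hj => (List.pairwise_cons.1 hpw).1 j (by simp [hj])
    have hor : ∀ j ∈ rest, o > j :=
      fun j hj => (List.pairwise_cons.1 (List.pairwise_cons.1 hpw).2).1 j hj
    have hwi : w < i := hlt w (by simp)
    have hoi : o < i := hlt o (by simp)
    have hri : ∀ j ∈ rest, j < i := fun j hj => hlt j (by simp [hj])
    -- A side: one pop, then the while condition fails
    have hA : aWhile cs check cnt (i :: w :: o :: rest)
        = (((check.set o false).set w false).set i false, cnt + 1, rest) := by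
      rw [aWhile]
      simp only [ho, hw, hi0, and_self, if_pos]
      apply aWhile_no_match
      intro t' w' o' r' hr hcond
      exact hnp ['1', '1'] (r'.map (charAt cs))
        (by simp [hr, hw, ho, hcond.1, hcond.2.1, hcond.2.2])
    -- B side: the new top three are '0','1','1'
    have hB : bStep (List.map (charAt cs) (w :: o :: rest), cnt) (charAt cs i)
        = (rest.map (charAt cs), cnt + 1) := by
      simp [bStep, hi0, ho, hw]
    rw [hA, hB]
    refine ⟨rfl, rfl, ?_, ?_, ?_, ?_, ?_⟩
    · exact (List.pairwise_cons.1 (List.pairwise_cons.1 hpw).2).2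
    · exact fun j hj => Nat.lt_succ_of_lt (hri j hj)
    · simpa using hlen
    · intro j hj
      by_cases hji : j = i
      · subst hji
        rw [List.getD, List.getElem?_set_self (by simpa [hlen] using hj)]
        simp only [Option.getD_some]
        constructor
        · intro h; exact absurd h (by simp)
        · rintro (h | h)
          · exact absurd (hri j h) (lt_irrefl j)
          · omega
      · rw [List.getD, List.getElem?_set_ne (by omega), ← List.getD]
        by_cases hjw : j = w
        · subst hjw
          rw [List.getD, List.getElem?_set_self (by simpa [hlen] using hj), Option.getD_some]
          constructor
          · intro h; exact absurd h (by simp)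
          · rintro (h | h)
            · exact absurd (hwr j h) (lt_irrefl j)
            · omega
        · rw [List.getD, List.getElem?_set_ne (by omega), ← List.getD]
          by_cases hjo : j = o
          · subst hjo
            rw [List.getD, List.getElem?_set_self (by simpa [hlen] using hj), Option.getD_some]
            constructor
            · intro h; exact absurd h (by simp)
            · rintro (h | h)
              · exact absurd (hor j h) (lt_irrefl j)
              · omega
          · rw [List.getD, List.getElem?_set_ne (by omega), ← List.getD, hchk j hj]
            constructor
            · rintro (h | h)
              · simp only [List.mem_cons] at h
                rcases h with h | h | h
                · exact absurd h hjw
                · exact absurd h hjo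
                · exact Or.inl h
              · right; omega
            · rintro (h | h)
              · exact Or.inl (by simp [h])
              · right; omega
    · intro l1 l2 h
      simp only at h
      exact hnp ('1' :: '1' :: l1) l2 (by simp [hw, ho, h])
  · -- no pop on either side
    have hA : aWhile cs check cnt (i :: st) = (check, cnt, i :: st) := by
      apply aWhile_no_match
      intro t' w' o' r' hr hcond
      cases hr
      exact hc ⟨w', o', r', rfl, hcond.1, hcond.2.1, hcond.2.2⟩
    have hB : bStep (st.map (charAt cs), cnt) (charAt cs i)
        = (charAt cs i :: st.map (charAt cs), cnt) := by
      unfold bStep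
      simp only
      rw [if_neg]
      intro h
      match st, h with
      | x :: y :: r, h =>
        simp only [List.map_cons, List.take_succ_cons, List.take_zero] at h
        injection h with h1 h
        injection h with h2 h
        injection h with h3 h
        exact hc ⟨x, y, r, rfl, h3, h2, h1⟩
      | [], h => simp at h
      | [x], h => simp at h
    rw [hA, hB]
    refine ⟨rfl, rfl, ?_, ?_, hlen, ?_, ?_⟩
    · exact List.pairwise_cons.2 ⟨fun j hj => hlt j hj, hpw⟩
    · intro j hj
      simp only [List.mem_cons] at hj
      rcases hj with h | h
      · omega
      · exact Nat.lt_succ_of_lt (hlt j h)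
    · intro j hj
      rw [hchk j hj]
      simp only [List.mem_cons]
      constructor
      · rintro (h | h)
        · exact Or.inl (Or.inr h)
        · rcases Nat.eq_or_lt_of_le h with h' | h'
          · exact Or.inl (Or.inl h'.symm)
          · exact Or.inr h'
      · rintro ((h | h) | h)
        · exact Or.inr (h ▸ le_refl j)
        · exact Or.inl h
        · exact Or.inr (by omega)
    · intro l1 l2 h
      match l1, h with
      | [], h =>
        simp only [List.nil_append] at h
        match st, h with
        | x :: y :: r, h =>
          simp only [List.map_cons] at h
          injection h with h1 h
          injection h with h2 h
          injection h with h3 h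
          exact hc ⟨x, y, r, rfl, h3, h2, h1⟩
        | [], h => simp at h
        | [x], h => simp at h
      | x :: l1', h =>
        simp only [List.cons_append] at h
        injection h with h1 h
        exact hnp l1' l2 h

-- A's resolved-state step, packaged
def aWhileP (cs : List Char) (A : List Bool × Nat × List Nat) : List Bool × Nat × List Nat :=
  aWhile cs A.1 A.2.1 A.2.2

-- the interleaving `while; push` … `while` equals a fold of `while ∘ push`
theorem aWhile_fold_norm (cs : List Char) :
    ∀ (l : List Nat) (acc : List Bool × Nat × List Nat),
      aWhileP cs (l.foldl (fun acc i =>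
          let r := aWhile cs acc.1 acc.2.1 acc.2.2
          (r.1, r.2.1, i :: r.2.2)) acc)
      = l.foldl (fun acc i => aWhileP cs (acc.1, acc.2.1, i :: acc.2.2)) (aWhileP cs acc) := by
  intro l
  induction l with
  | nil => intro acc; rfl
  | cons i l ih =>
    intro acc
    simp only [List.foldl_cons]
    rw [ih]
    rfl

theorem fold_inv (cs : List Char) :
    ∀ (n : Nat), n ≤ cs.length →
      AInv cs n
        ((List.range n).foldl (fun acc i => aWhileP cs (acc.1, acc.2.1, i :: acc.2.2))
          (List.replicate cs.length true, 0, ([] : List Nat)))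
        ((cs.take n).foldl bStep ([], 0)) := by
  intro n
  induction n with
  | zero =>
    intro _
    refine ⟨rfl, rfl, List.Pairwise.nil, by simp, by simp, ?_, ?_⟩
    · intro j hj
      simp [List.getD_eq_getElem?_getD, hj]
    · intro l1 l2 h; simp at h
  | succ n ih =>
    intro hn
    have hn' : n < cs.length := hn
    have h1 : List.range (n + 1) = List.range n ++ [n] := List.range_succ
    have h2 : cs.take (n + 1) = cs.take n ++ [cs[n]] := by
      rw [List.take_add_one, List.getElem?_eq_getElem hn']
      rfl
    rw [h1, h2, List.foldl_append, List.foldl_append]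
    simp only [List.foldl_cons, List.foldl_nil]
    have hcn : cs[n] = charAt cs n := by simp [charAt, List.getD_eq_getElem?_getD, List.getElem?_eq_getElem hn']
    rw [hcn]
    exact inv_step cs n _ _ (ih (le_of_lt hn')) hn'

-- filtering `range n` by membership in a strictly descending bounded list gives its reverse
theorem filter_desc : ∀ (n : Nat) (st : List Nat), List.Pairwise (· > ·) st → (∀ j ∈ st, j < n) →
    (List.range n).filter (fun j => decide (j ∈ st)) = st.reverse := by
  intro n
  induction n with
  | zero =>
    intro st _ hlt
    match st with
    | [] => rfl
    | j :: t => exact absurd (hlt j (by simp)) (by omega)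
  | succ n ih =>
    intro st hpw hlt
    rw [List.range_succ, List.filter_append]
    by_cases hn : n ∈ st
    · match st with
      | [] => simp at hn
      | h :: t =>
        have hh : h = n := by
          have h1 : h < n + 1 := hlt h (by simp)
          rcases List.mem_cons.1 hn with h2 | h2
          · omega
          · exact absurd ((List.pairwise_cons.1 hpw).1 n h2) (by omega)
        subst hh
        have ht : ∀ j ∈ t, j < h := fun j hj => (List.pairwise_cons.1 hpw).1 j hj
        have hcong : (List.range h).filter (fun j => decide (j ∈ h :: t))
            = (List.range h).filter (fun j => decide (j ∈ t)) := by
          apply List.filter_congr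
          intro j hj
          have : j ≠ h := by simp at hj; omega
          simp [List.mem_cons, this]
        rw [hcong, ih t (List.pairwise_cons.1 hpw).2 ht]
        simp
    · have hlt' : ∀ j ∈ st, j < n := by
        intro j hj
        have := hlt j hj
        have : j ≠ n := fun h => hn (h ▸ hj)
        omega
      rw [ih st hpw hlt']
      simp [hn]

-- last index of '0' (proof-side characterization of both insertion-position loops)
def lastZ? : List Char → Option Nat
  | [] => none
  | c :: t =>
    match lastZ? t with
    | some k => some (k + 1)
    | none => if c = '0' then some 0 else none

theorem lastZ?_append (l : List Char) (a : Char) :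
    lastZ? (l ++ [a]) = if a = '0' then some l.length else lastZ? l := by
  induction l with
  | nil => by_cases h : a = '0' <;> simp [lastZ?, h]
  | cons c t ih =>
    simp only [List.cons_append, lastZ?, ih]
    by_cases h : a = '0'
    · simp [h]
    · simp [h]

theorem lastZ?_eq_none_iff (l : List Char) : lastZ? l = none ↔ '0' ∉ l := by
  induction l with
  | nil => simp [lastZ?]
  | cons c t ih =>
    rw [lastZ?]
    match h : lastZ? t with
    | some k =>
      simp only [List.mem_cons]
      constructor
      · intro h2; cases h2
      · intro h2
        exact absurd h (by rw [ih.2 (fun hm => h2 (Or.inr hm))]; simp)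
    | none =>
      have ht : '0' ∉ t := ih.1 h
      by_cases hc : c = '0'
      · simp [hc]
      · simp [hc, ht, eq_comm]

theorem pyRange_down (n : Nat) :
    PySem.List.pyRange ((n:Int) - 1) (-1) (-1) = (List.range n).map (fun k : Nat => (n:Int) - 1 - (k:Int)) := by
  simp only [PySem.List.pyRange]
  norm_num
  have h1 : (if 0 < n then n else 0) = n := by split <;> omega
  rw [h1]
  have h2 : (List.range n).flatMap (fun a => ([((a:Nat):Int)] : List Int))
      = (List.range n).map (fun a => ((a:Nat):Int)) := by
    induction (List.range n) with
    | nil => rfl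
    | cons x l ih => simp [List.flatMap_cons, ih]
  apply List.ext_getElem (by simp)
  intro i h2 h3
  simp
  omega

-- B's enumerate loop computes (last index of '0') + 1, or 0
theorem bfold_eq (tmp : List Char) :
    tmp.zipIdx.foldl (fun q kc => if kc.1 = '0' then (kc.2 : Int) + 1 else q) 0
    = (match lastZ? tmp with | some k => (k : Int) + 1 | none => 0) := by
  induction tmp using List.reverseRecOn with
  | nil => rfl
  | append_singleton t a ih =>
    rw [List.zipIdx_append, List.foldl_append, lastZ?_append]
    by_cases h : a = '0' <;> simp [List.zipIdx, h, ih]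

theorem afold_some (tmp : List Char) (l : List Int) (k : Nat) :
    l.foldl (fun (acc : Option Nat) i =>
      match acc with
      | some _ => acc
      | none => if PySem.List.pyGetD tmp i ' ' = '0' then some i.toNat else none) (some k) = some k := by
  induction l with
  | nil => rfl
  | cons x l ih => simpa using ih

-- A's backward break-loop computes the last index of '0' (as an Option)
theorem afold_eq (tmp : List Char) :
    (PySem.List.pyRange ((tmp.length : Int) - 1) (-1) (-1)).foldl
      (fun (acc : Option Nat) i =>
        match acc with
        | some _ => acc
        | none => if PySem.List.pyGetD tmp i ' ' = '0' then some i.toNat else none) none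
    = lastZ? tmp := by
  induction tmp using List.reverseRecOn with
  | nil =>
    rw [show ((([] : List Char).length : Int) - 1) = ((0:Nat):Int) - 1 by norm_num, pyRange_down 0]
    rfl
  | append_singleton t a ih =>
    have hlen : ((t ++ [a]).length : Int) - 1 = ((t.length + 1 : Nat) : Int) - 1 := by simp
    rw [hlen, pyRange_down (t.length + 1), List.range_succ_eq_map, List.map_cons, List.foldl_cons,
      lastZ?_append]
    have e0 : ((t.length + 1 : Nat) : Int) - 1 - ((0:Nat):Int) = ((t.length : Nat) : Int) := by
      push_cast; ring
    have hget : PySem.List.pyGetD (t ++ [a]) ((t.length : Nat) : Int) ' ' = a := by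
      rw [PySem.List.pyGetD_natCast, List.getD_append_right t [a] ' ' t.length le_rfl]
      simp [List.getD]
    simp only [Nat.cast_zero, sub_zero]
    have e0' : ((t.length + 1 : Nat) : Int) - 1 = ((t.length : Nat) : Int) := by push_cast; ring
    rw [e0', hget]
    by_cases h : a = '0'
    · subst h
      rw [if_pos rfl, Int.toNat_natCast, afold_some, if_pos rfl]
    · rw [if_neg h, if_neg (by simpa using h)]
      rw [List.map_map, List.foldl_map]
      rw [← ih, pyRange_down t.length, List.foldl_map]
      apply PySem.List.foldl_congr_mem
      intro acc k hk
      have hkm : k < t.length := List.mem_range.1 hk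
      match acc with
      | some j => rfl
      | none =>
        have e1 : ((t.length : Nat) : Int) - ((Nat.succ k : Nat) : Int)
            = ((t.length - 1 - k : Nat) : Int) := by push_cast; omega
        have e2 : ((t.length : Nat) : Int) - 1 - ((k : Nat) : Int)
            = ((t.length - 1 - k : Nat) : Int) := by omega
        simp only [Function.comp, e1, e2]
        rw [PySem.List.pyGetD_natCast, PySem.List.pyGetD_natCast,
          List.getD_append t [a] ' ' _ (by omega)]

theorem singleton_infix (c : Char) (l : List Char) : [c] <:+: l ↔ c ∈ l := by
  constructor
  · rintro ⟨s, t, rfl⟩; simp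
  · intro h
    obtain ⟨s, t, rfl⟩ := List.append_of_mem h
    exact ⟨s, t, by simp⟩

-- A's three insertion branches produce exactly the single splice of stackPerString
theorem insert_eq (tmp : List Char) (cnt : Nat) :
    (if PySem.Chars.isIn ['1', '1'] tmp then
      PySem.List.slice tmp none (some (PySem.Chars.find tmp ['1', '1'])) ++ repChars cnt ++
        PySem.List.slice tmp (some (PySem.Chars.find tmp ['1', '1'])) none
    else if PySem.Chars.isIn ['0'] tmp then
      tmp.take ((((PySem.List.pyRange ((tmp.length : Int) - 1) (-1) (-1)).foldl
          (fun (acc : Option Nat) i =>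
            match acc with
            | some _ => acc
            | none => if PySem.List.pyGetD tmp i ' ' = '0' then some i.toNat else none) none).getD 0) + 1)
        ++ repChars cnt ++
        tmp.drop ((((PySem.List.pyRange ((tmp.length : Int) - 1) (-1) (-1)).foldl
          (fun (acc : Option Nat) i =>
            match acc with
            | some _ => acc
            | none => if PySem.List.pyGetD tmp i ' ' = '0' then some i.toNat else none) none).getD 0) + 1)
    else repChars cnt ++ tmp)
    = PySem.List.slice tmp none (some (if PySem.Chars.find tmp ['1', '1'] < 0 then
          tmp.zipIdx.foldl (fun q kc => if kc.1 = '0' then (kc.2 : Int) + 1 else q) 0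
        else PySem.Chars.find tmp ['1', '1'])) ++ repChars cnt ++
      PySem.List.slice tmp (some (if PySem.Chars.find tmp ['1', '1'] < 0 then
          tmp.zipIdx.foldl (fun q kc => if kc.1 = '0' then (kc.2 : Int) + 1 else q) 0
        else PySem.Chars.find tmp ['1', '1'])) none := by
  by_cases h11 : PySem.Chars.isIn ['1', '1'] tmp = true
  · rw [if_pos h11]
    have hf : 0 ≤ PySem.Chars.find tmp ['1', '1'] :=
      (PySem.Chars.find_nonneg_iff tmp ['1', '1']).2 ((PySem.Chars.isIn_iff_infix _ _).1 h11)
    rw [if_neg (by omega)]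
  · rw [if_neg h11]
    have hf : PySem.Chars.find tmp ['1', '1'] = -1 :=
      (PySem.Chars.find_eq_neg_one_iff tmp ['1', '1']).2
        (fun hin => h11 ((PySem.Chars.isIn_iff_infix _ _).2 hin))
    rw [hf, if_pos (show (-1:Int) < 0 by norm_num), bfold_eq, afold_eq]
    by_cases h0 : PySem.Chars.isIn ['0'] tmp = true
    · rw [if_pos h0]
      have hmem : '0' ∈ tmp := (singleton_infix '0' tmp).1 ((PySem.Chars.isIn_iff_infix _ _).1 h0)
      rcases hz : lastZ? tmp with _ | k
      · exact absurd ((lastZ?_eq_none_iff tmp).1 hz) (by simp [hmem])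
      · simp only [Option.getD_some]
        have e1 : ((k : Int) + 1) = ((k + 1 : Nat) : Int) := by push_cast; ring
        rw [e1, PySem.List.slice_to_natCast, PySem.List.slice_from_natCast]
    · rw [if_neg h0]
      have hmem : '0' ∉ tmp :=
        fun hm => h0 ((PySem.Chars.isIn_iff_infix _ _).2 ((singleton_infix '0' tmp).2 hm))
      rw [(lastZ?_eq_none_iff tmp).2 hmem]
      have e1 : (0 : Int) = ((0 : Nat) : Int) := rfl
      rw [e1, PySem.List.slice_to_natCast, PySem.List.slice_from_natCast]
      simp

theorem a_eq_stack (str : String) : aPerString str = stackPerString str := by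
  simp only [aPerString, stackPerString]
  set S := List.foldl
      (fun (acc : List Bool × Nat × List Nat) i =>
        ((aWhile str.toList acc.1 acc.2.1 acc.2.2).1, (aWhile str.toList acc.1 acc.2.1 acc.2.2).2.1,
          i :: (aWhile str.toList acc.1 acc.2.1 acc.2.2).2.2))
      (List.replicate str.toList.length true, 0, ([] : List Nat)) (List.range str.toList.length) with hS
  set Afin := aWhile str.toList S.1 S.2.1 S.2.2 with hA
  set Bfin := str.toList.foldl bStep ([], 0) with hBfin
  have hnorm : Afin
      = (List.range str.toList.length).foldl
          (fun acc i => aWhileP str.toList (acc.1, acc.2.1, i :: acc.2.2))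
          (List.replicate str.toList.length true, 0, ([] : List Nat)) :=
    aWhile_fold_norm str.toList (List.range str.toList.length)
      (List.replicate str.toList.length true, 0, ([] : List Nat))
  have inv := fold_inv str.toList str.toList.length le_rfl
  rw [List.take_length, ← hnorm] at inv
  obtain ⟨hmap, hcnt, hpw, hlt, hlen, hchk, hnp⟩ := inv
  -- the reconstruction pass produces the (reversed) character stack
  have htmp : (List.range str.toList.length).foldl
      (fun acc i => if Afin.1.getD i false then acc ++ [charAt str.toList i] else acc) []
      = Bfin.1.reverse := by
    rw [PySem.List.foldl_append_if, List.nil_append]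
    have hfc : (List.range str.toList.length).filter (fun i => Afin.1.getD i false)
        = (List.range str.toList.length).filter (fun j => decide (j ∈ Afin.2.2)) := by
      apply List.filter_congr
      intro j hj
      have hjn : j < str.toList.length := List.mem_range.1 hj
      cases b : Afin.1.getD j false
      · symm
        simp only [decide_eq_false_iff_not]
        intro hm
        have := (hchk j hjn).2 (Or.inl hm)
        rw [b] at this
        cases this
      · symm
        simp only [decide_eq_true_eq]
        rcases (hchk j hjn).1 b with h | h
        · exact h
        · omega
    rw [hfc, filter_desc str.toList.length Afin.2.2 hpw hlt, List.map_reverse, hmap, ← hBfin]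
  rw [htmp, hcnt, ← hBfin, ← apply_ite String.ofList, ← apply_ite String.ofList]
  exact congrArg String.ofList (insert_eq Bfin.1.reverse Bfin.2)

-- ---- part 2: B's replace-fixpoint equals the character-stack pass ----

-- the stack component of bStep, alone
def stkStep (S : List Char) (c : Char) : List Char :=
  if (c :: S).take 3 = ['0', '1', '1'] then (c :: S).drop 3 else c :: S

theorem bStep_fst (S : List Char) (n : Nat) (c : Char) : (bStep (S, n) c).1 = stkStep S c := by
  unfold bStep stkStep
  simp only
  split_ifs <;> rfl

theorem fold_bStep_fst : ∀ (t : List Char) (S : List Char) (n : Nat),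
    (t.foldl bStep (S, n)).1 = t.foldl stkStep S := by
  intro t
  induction t with
  | nil => intro S n; rfl
  | cons c t ih =>
    intro S n
    simp only [List.foldl_cons]
    rcases hb : bStep (S, n) c with ⟨S', n'⟩
    have : S' = stkStep S c := by rw [← bStep_fst S n c, hb]
    rw [this] at hb ⊢
    exact ih _ n'

theorem fold_bStep_len : ∀ (t : List Char) (S : List Char) (n : Nat),
    3 * (t.foldl bStep (S, n)).2 + (t.foldl bStep (S, n)).1.length = 3 * n + S.length + t.length := by
  intro t
  induction t with
  | nil => intro S n; simp
  | cons c t ih =>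
    intro S n
    simp only [List.foldl_cons]
    by_cases h : (c :: S).take 3 = ['0', '1', '1']
    · have hb : bStep (S, n) c = ((c :: S).drop 3, n + 1) := by
        unfold bStep; simp only; rw [if_pos h]
      rw [hb]
      match S, h with
      | x :: y :: S2, h =>
        rw [show (c :: x :: y :: S2).drop 3 = S2 from rfl, ih]
        simp
        omega
      | [], h => simp at h
      | [x], h => simp at h
    · have hb : bStep (S, n) c = (c :: S, n) := by
        unfold bStep; simp only; rw [if_neg h]
      rw [hb, ih]
      simp
      omega

theorem stk_110 (S v : List Char) :
    List.foldl stkStep S ('1' :: '1' :: '0' :: v) = List.foldl stkStep S v := by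
  simp only [List.foldl_cons]
  have h1 : stkStep S '1' = '1' :: S := by
    unfold stkStep
    rw [if_neg]
    intro h
    rw [List.take_succ_cons] at h
    injection h with h1 _
    exact absurd h1 (by decide)
  have h2 : stkStep ('1' :: S) '1' = '1' :: '1' :: S := by
    unfold stkStep
    rw [if_neg]
    intro h
    rw [List.take_succ_cons] at h
    injection h with h1 _
    exact absurd h1 (by decide)
  have h3 : stkStep ('1' :: '1' :: S) '0' = S := by
    unfold stkStep
    rw [if_pos (show List.take 3 ('0' :: '1' :: '1' :: S) = ['0', '1', '1'] from rfl)]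
    rfl
  rw [h1, h2, h3]

theorem stk_del : ∀ (l : List Char) (S : List Char),
    List.foldl stkStep S (del l) = List.foldl stkStep S l := by
  intro l
  induction l using del.induct with
  | case1 => intro S; rw [del]
  | case2 c t hp ih =>
    intro S
    rw [del, if_pos hp]
    obtain ⟨u, hu⟩ := List.isPrefixOf_iff_prefix.1 hp
    have hct : c :: t = '1' :: '1' :: '0' :: u := hu.symm
    have hdrop : t.drop 2 = u := by
      injection hct with _ ht
      rw [ht]
      rfl
    rw [hct, stk_110, ← hdrop]
    exact ih S
  | case3 c t hp ih =>
    intro S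
    rw [del, if_neg hp]
    simp only [List.foldl_cons]
    exact ih _

theorem stk_bLoop : ∀ (w : List Char) (S : List Char),
    List.foldl stkStep S (bLoop w) = List.foldl stkStep S w := by
  intro w
  induction w using bLoop.induct with
  | case1 t h ih =>
    intro S
    rw [bLoop, dif_pos h, ih, replace110_eq_del, stk_del]
  | case2 t h =>
    intro S
    rw [bLoop, dif_neg h]

theorem bLoop_no_infix : ∀ (w : List Char), ¬ (['1', '1', '0'] <:+: bLoop w) := by
  intro w
  induction w using bLoop.induct with
  | case1 t h ih => rw [bLoop, dif_pos h]; exact ih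
  | case2 t h =>
    rw [bLoop, dif_neg h]
    exact (PySem.Chars.isIn_eq_false_iff _ _).1 (by simpa using h)

theorem stk_no_infix : ∀ (t S : List Char), ¬ (['1', '1', '0'] <:+: (S.reverse ++ t)) →
    List.foldl stkStep S t = t.reverse ++ S := by
  intro t
  induction t with
  | nil => intro S _; simp
  | cons c t ih =>
    intro S h
    simp only [List.foldl_cons]
    have hstep : stkStep S c = c :: S := by
      unfold stkStep
      rw [if_neg]
      intro hp
      rw [List.take_succ_cons] at hp
      injection hp with h1 h2
      subst h1
      match S, h2 with
      | x :: y :: S2, h2 =>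
        simp only [List.take_succ_cons, List.take_zero] at h2
        injection h2 with hx h2
        injection h2 with hy _
        subst hx hy
        exact h ⟨S2.reverse, t, by simp⟩
      | [], h2 => simp at h2
      | [x], h2 => simp at h2
    rw [hstep, ih (c :: S) (by simpa using h)]
    simp

theorem bLoop_eq_stack (w : List Char) : bLoop w = ((w.foldl bStep ([], 0)).1).reverse := by
  have h1 : List.foldl stkStep [] (bLoop w) = (bLoop w).reverse ++ [] :=
    stk_no_infix (bLoop w) [] (by simpa using bLoop_no_infix w)
  have h2 := stk_bLoop w []
  rw [h1] at h2
  rw [fold_bStep_fst, ← h2]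
  simp

theorem cnt_eq_stack (w : List Char) :
    (PySem.Int.floordiv ((w.length : Int) - ((bLoop w).length : Int)) 3).toNat
      = (w.foldl bStep ([], 0)).2 := by
  have hlen := fold_bStep_len w [] 0
  simp only [List.length_nil, Nat.mul_zero, Nat.zero_add, Nat.add_zero] at hlen
  rw [bLoop_eq_stack, List.length_reverse]
  have e : (w.length : Int) - ((w.foldl bStep ([], 0)).1.length : Int)
      = ((3 * (w.foldl bStep ([], 0)).2 : Nat) : Int) := by
    push_cast
    omega
  rw [e, show (3 : Int) = ((3 : Nat) : Int) from rfl, PySem.Int.floordiv_natCast]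
  simp

theorem stack_eq_b (str : String) : stackPerString str = bPerString str := by
  simp only [stackPerString, bPerString]
  rw [cnt_eq_stack, bLoop_eq_stack]

-- ===== VERDICT (by name: the statement is the Claim_ definition above) =====
theorem solution_spec : Claim_equal_solution := by
  intro s _
  unfold Spec_solution solution solution_alt
  rw [PySem.List.foldl_append_singleton_eq_map]
  simp [a_eq_stack, stack_eq_b]
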